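-- pv_equiv track=rewrite | github.com/tobiasah/mkdocs-caption | src/mkdocs_caption/helper.py | _parse_extended_markdown
-- ===== SOURCE A (Python) =====
-- def _parse_extended_markdown(options: str | None) -> str:
--     """Parse special extended markdown syntax.
--
--     The extended markdown syntax allows for adding classes and ids to
--     markdown elements through the use of the following syntax: .class #id
--     This function parses the options and converts these two use cases into
--     valid html attributes.
--
--     Args:
--         options: The options to parse.
--
--     Returns:
--         The parsed options.
--     """
--     if not options:
--         return ""
--     # Not the nicest solution but I could not find the place where python
--     # markdown parses the options.
--     split_options = options.split(" ")
--     output_options = []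
--     for option in split_options:
--         if option.startswith("."):
--             output_options.append("class=" + option[1:])
--         elif option.startswith("#"):
--             output_options.append("id=" + option[1:])
--         else:
--             output_options.append(option)
--     return " ".join(output_options)
-- ===== SOURCE B (Python) =====
-- def _parse_extended_markdown(options):
--     if not options:
--         return ""
--     out = []
--     start = True
--     for ch in options:
--         if start and ch == ".":
--             out.append("class=")
--         elif start and ch == "#":
--             out.append("id=")
--         else:
--             out.append(ch)
--         start = ch == " "
--     return "".join(out)
-- ===== Notes on version B (the rewrite author's own statement) =====
-- stated objective: alternative
-- what changed: Replaces split-on-space + per-token branch + join with a single character-level pass carrying a token-start flag, rewriting '.'/'#' only at token starts.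
import Mathlib
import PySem

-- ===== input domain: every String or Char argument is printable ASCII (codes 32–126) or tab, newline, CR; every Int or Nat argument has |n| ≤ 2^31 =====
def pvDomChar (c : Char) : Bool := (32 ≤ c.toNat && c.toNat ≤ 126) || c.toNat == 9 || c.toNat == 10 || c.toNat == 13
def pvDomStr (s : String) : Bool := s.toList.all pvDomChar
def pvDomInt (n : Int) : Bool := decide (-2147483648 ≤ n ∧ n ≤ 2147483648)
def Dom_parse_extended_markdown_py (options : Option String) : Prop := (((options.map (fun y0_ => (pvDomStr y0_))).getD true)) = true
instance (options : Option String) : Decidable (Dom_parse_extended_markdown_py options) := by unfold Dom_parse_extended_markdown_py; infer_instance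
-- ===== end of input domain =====

-- B replaces A's split-on-space / per-token branching / join with a single character-level pass carrying a token-start flag (alternative decomposition; same value on every input).


-- ===== PORT A =====
-- token transform: A's loop body for one token of options.split(" ")
def pvTokA (t : List Char) : List Char :=
  if PySem.Chars.startswith t ['.'] then "class=".toList ++ PySem.Chars.slice t (some 1) none
  else if PySem.Chars.startswith t ['#'] then "id=".toList ++ PySem.Chars.slice t (some 1) none
  else t

def parse_extended_markdown_py (options : Option String) : String :=
  match options with
  | none => ""
  | some s =>
    if s = "" then ""
    else
      let split_options := PySem.Chars.splitOn s.toList [' ']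
      let output_options := split_options.map pvTokA
      String.ofList (PySem.Chars.join [' '] output_options)

-- ===== PORT B =====
-- one-pass scan: `start` is true at the beginning and right after a space
def pvScanB (start : Bool) (cs : List Char) : List Char :=
  match cs with
  | [] => []
  | c :: rest =>
    (if start && (c == '.') then "class=".toList
     else if start && (c == '#') then "id=".toList
     else [c]) ++ pvScanB (c == ' ') rest

def parse_extended_markdown_py_alt (options : Option String) : String :=
  match options with
  | none => ""
  | some s =>
    if s = "" then ""
    else String.ofList (pvScanB true s.toList)

-- ===== PRECONDITION & SPEC =====
def Spec_parse_extended_markdown_py (options : Option String) (out : String) : Prop := out = parse_extended_markdown_py_alt options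
instance (options : Option String) (out : String) : Decidable (Spec_parse_extended_markdown_py options out) := by unfold Spec_parse_extended_markdown_py; infer_instance

-- ===== CLAIM (what is proved, stated in full; the proofs are below) =====
def Claim_equal_parse_extended_markdown_py : Prop := ∀ (options : Option String), Dom_parse_extended_markdown_py options → Spec_parse_extended_markdown_py options (parse_extended_markdown_py options)

-- ===== LEMMAS AND PROOFS =====

-- ===== VERDICT (by name: the statement is the Claim_ definition above) =====
-- structural single-char split, to be shown equal to PySem.Chars.splitOn · [' ']
def pvSplitSp : List Char → List (List Char)
  | [] => [[]]
  | c :: rest =>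
    if c = ' ' then [] :: pvSplitSp rest
    else
      match pvSplitSp rest with
      | [] => [[c]]
      | t :: ts => (c :: t) :: ts

lemma pvSplitSp_ne_nil (cs : List Char) : pvSplitSp cs ≠ [] := by
  cases cs with
  | nil => simp [pvSplitSp]
  | cons c rest =>
    simp only [pvSplitSp]
    split
    · simp
    · split <;> simp

def pvMapHead (g : List Char → List Char) : List (List Char) → List (List Char)
  | [] => []
  | t :: ts => g t :: ts

lemma pv_go_spec (fuel : Nat) (l cur : List Char) (acc : List (List Char))
    (h : l.length < fuel) :
    PySem.Chars.splitOn.go [' '] fuel l cur acc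
      = acc.reverse ++ pvMapHead (fun t => cur.reverse ++ t) (pvSplitSp l) := by
  induction fuel generalizing l cur acc with
  | zero => omega
  | succ f ih =>
    cases l with
    | nil =>
      simp [PySem.Chars.splitOn.go, pvSplitSp, pvMapHead]
    | cons c rest =>
      rw [PySem.Chars.splitOn.go]
      by_cases hc : c = ' '
      · subst hc
        have hp : List.isPrefixOf [' '] (' ' :: rest) = true := by
          simp [List.isPrefixOf]
        rw [if_pos hp]
        rw [ih _ _ _ (by simpa using Nat.lt_of_succ_lt_succ h)]
        rcases hts : pvSplitSp rest with _ | ⟨t, ts⟩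
        · exact absurd hts (pvSplitSp_ne_nil rest)
        · simp [pvSplitSp, pvMapHead, hts]
      · have hp : List.isPrefixOf [' '] (c :: rest) = false := by
          simp only [List.isPrefixOf, List.isPrefixOf_cons₂_self, Bool.and_eq_false_iff]
          simp [beq_eq_false_iff_ne]
          exact fun h => hc h.symm
        rw [if_neg (by simp [hp])]
        rw [ih _ _ _ (by simpa using Nat.lt_of_succ_lt_succ h)]
        rcases hts : pvSplitSp rest with _ | ⟨t, ts⟩
        · exact absurd hts (pvSplitSp_ne_nil rest)
        · simp [pvSplitSp, hc, hts, pvMapHead]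

lemma pv_splitOn_eq (cs : List Char) :
    PySem.Chars.splitOn cs [' '] = pvSplitSp cs := by
  rw [PySem.Chars.splitOn, pv_go_spec _ _ _ _ (by omega)]
  rcases h : pvSplitSp cs with _ | ⟨t, ts⟩
  · exact absurd h (pvSplitSp_ne_nil cs)
  · simp [pvMapHead]

lemma pv_intercalate_append (sep a b : List Char) (l : List (List Char)) :
    sep.intercalate ((a ++ b) :: l) = a ++ sep.intercalate (b :: l) := by
  cases l <;> simp [List.intercalate]

def pvApplyF : Bool → List (List Char) → List (List Char)
  | _, [] => []
  | true, t :: ts => pvTokA t :: ts.map pvTokA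
  | false, t :: ts => t :: ts.map pvTokA

lemma pvTokA_nil : pvTokA [] = [] := by decide

lemma pv_scan_eq (cs : List Char) (b : Bool) :
    pvScanB b cs = [' '].intercalate (pvApplyF b (pvSplitSp cs)) := by
  induction cs generalizing b with
  | nil => cases b <;> simp [pvScanB, pvSplitSp, pvApplyF, pvTokA_nil, List.intercalate]
  | cons c rest ih =>
    by_cases hc : c = ' '
    · subst hc
      rcases hts : pvSplitSp rest with _ | ⟨t, ts⟩
      · exact absurd hts (pvSplitSp_ne_nil rest)
      · have hr := ih true
        rw [hts] at hr
        cases b <;>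
          simp only [pvScanB, pvSplitSp, hts, pvApplyF, if_true, pvTokA_nil] <;>
          simp [hr, List.intercalate, pvApplyF, pvTokA_nil]
    · rcases hts : pvSplitSp rest with _ | ⟨t, ts⟩
      · exact absurd hts (pvSplitSp_ne_nil rest)
      · have hsp : pvSplitSp (c :: rest) = (c :: t) :: ts := by
          simp [pvSplitSp, hc, hts]
        have hr := ih false
        rw [hts] at hr
        have hscan : pvScanB b (c :: rest)
            = (if b && (c == '.') then "class=".toList
               else if b && (c == '#') then "id=".toList
               else [c]) ++ pvScanB false rest := by
          have hce : (c == ' ') = false := by simp [hc]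
          simp [pvScanB, hce]
        cases b with
        | false =>
          rw [hscan, hr, hsp]
          simpa [pvApplyF] using (pv_intercalate_append [' '] [c] t (ts.map pvTokA)).symm
        | true =>
          rw [hscan, hr, hsp]
          have htok : pvTokA (c :: t)
              = (if c == '.' then "class=".toList
                 else if c == '#' then "id=".toList
                 else [c]) ++ t := by
            simp only [pvTokA, PySem.Chars.startswith]
            by_cases h1 : c = '.'
            · subst h1
              simp [List.isPrefixOf, PySem.Chars.slice_eq_listSlice,
                PySem.List.slice_from_one]
            · by_cases h2 : c = '#'
              · subst h2
                simp [List.isPrefixOf, PySem.Chars.slice_eq_listSlice,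
                  PySem.List.slice_from_one]
              · have ha : ¬('.' = c) := fun h => h1 h.symm
                have hb : ¬('#' = c) := fun h => h2 h.symm
                simp only [List.isPrefixOf, Bool.and_eq_true, beq_iff_eq, true_and, and_true]
                split_ifs <;> simp_all
          simp only [pvApplyF, htok]
          rw [pv_intercalate_append]
          simp

theorem parse_extended_markdown_py_spec : Claim_equal_parse_extended_markdown_py := by
  intro options _hdom
  unfold Spec_parse_extended_markdown_py
  cases options with
  | none => rfl
  | some s =>
    simp only [parse_extended_markdown_py, parse_extended_markdown_py_alt]
    by_cases hs : s = ""
    · simp [hs]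
    · simp only [hs, if_neg, ite_false]
      rw [pv_splitOn_eq, pv_scan_eq]
      rcases h : pvSplitSp s.toList with _ | ⟨t, ts⟩
      · exact absurd h (pvSplitSp_ne_nil _)
      · simp [PySem.Chars.join, pvApplyF]
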